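-- pv_equiv track=rewrite | github.com/trapped-in-a-while-loop/project-aa | greedy.py | getMaxDegreeVertexIndex
-- ===== SOURCE A (Python) =====
-- def getMaxDegreeVertexIndex(adj_mat):
--     max_degrees = 0
--     max_degrees_index = -1
--
--     for i in range(len(adj_mat)):
--         degrees_nb = adj_mat[i].count(1)
--         if (degrees_nb >= max_degrees):
--             max_degrees_index = i
--             max_degrees = degrees_nb
--
--     if max_degrees == 0:
--         return -1
--     return max_degrees_index
-- ===== SOURCE B (Python) =====
-- def getMaxDegreeVertexIndex(adj_mat):
--     degrees = [row.count(1) for row in adj_mat]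
--     if not degrees:
--         return -1
--     m = max(degrees)
--     if m == 0:
--         return -1
--     return len(degrees) - 1 - degrees[::-1].index(m)
-- ===== Notes on version B (the rewrite author's own statement) =====
-- stated objective: simpler
-- what changed: Replaces the single running-max/last-wins index scan with building the full degree table, taking its max, and locating the last occurrence of that max via a reversed-list index search.
import Mathlib
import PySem

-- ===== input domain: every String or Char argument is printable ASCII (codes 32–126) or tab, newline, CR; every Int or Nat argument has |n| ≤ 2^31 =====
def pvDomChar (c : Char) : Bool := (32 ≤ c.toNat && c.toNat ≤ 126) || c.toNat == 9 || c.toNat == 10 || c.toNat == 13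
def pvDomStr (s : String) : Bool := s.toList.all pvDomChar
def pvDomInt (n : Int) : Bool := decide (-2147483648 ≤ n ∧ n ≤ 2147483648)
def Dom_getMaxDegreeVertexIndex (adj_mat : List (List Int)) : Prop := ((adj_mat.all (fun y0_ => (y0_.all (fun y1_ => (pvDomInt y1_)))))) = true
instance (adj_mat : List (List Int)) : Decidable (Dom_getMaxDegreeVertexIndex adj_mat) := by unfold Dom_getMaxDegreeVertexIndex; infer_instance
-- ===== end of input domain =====

-- B replaces A's running-max/last-wins scan by building the full degree table, taking
-- its max, and locating the last occurrence of the max by a reversed-list index search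
-- (objective: simpler decomposition, same cost).

-- ===== PORT A =====
-- running-max scan over row indices; '>=' keeps the later index on ties
def getMaxDegreeVertexIndex (adj_mat : List (List Int)) : Int :=
  let st := (PySem.List.pyRange 0 adj_mat.length 1).foldl
    (fun (s : Int × Int) i =>
      let degrees_nb : Int := PySem.List.count (PySem.List.pyGetD adj_mat i []) 1
      if s.1 ≤ degrees_nb then (degrees_nb, i) else s)
    (0, -1)
  if st.1 = 0 then -1 else st.2

-- ===== PORT B =====
-- the two 'none' branches are unreachable (max? of a nonempty list; index of a member)
def getMaxDegreeVertexIndex_alt (adj_mat : List (List Int)) : Int :=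
  let degrees : List Int := adj_mat.map (fun row => (PySem.List.count row 1 : Int))
  if degrees.isEmpty then -1
  else
    match PySem.List.max? degrees (fun y => y) with
    | none => -1
    | some m =>
      if m = 0 then -1
      else
        match PySem.List.index? degrees.reverse m with
        | none => -1
        | some j => (degrees.length : Int) - 1 - (j : Int)

-- ===== PRECONDITION & SPEC =====
def Spec_getMaxDegreeVertexIndex (adj_mat : List (List Int)) (out : Int) : Prop := out = getMaxDegreeVertexIndex_alt adj_mat
instance (adj_mat : List (List Int)) (out : Int) : Decidable (Spec_getMaxDegreeVertexIndex adj_mat out) := by unfold Spec_getMaxDegreeVertexIndex; infer_instance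

-- ===== CLAIM (what is proved, stated in full; the proofs are below) =====
def Claim_equal_getMaxDegreeVertexIndex : Prop := ∀ (adj_mat : List (List Int)), Dom_getMaxDegreeVertexIndex adj_mat → Spec_getMaxDegreeVertexIndex adj_mat (getMaxDegreeVertexIndex adj_mat)

-- ===== LEMMAS AND PROOFS =====
/-- The degree table B builds. -/
def pvDeg (l : List (List Int)) : List Int := l.map (fun row => (PySem.List.count row 1 : Int))

/-- A's loop state after scanning `l`, expressed over (index, row) pairs. -/
def pvSt (l : List (List Int)) : Int × Int :=
  (PySem.List.enumerate l 0).foldl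
    (fun (s : Int × Int) p => if s.1 ≤ (PySem.List.count p.2 1 : Int) then ((PySem.List.count p.2 1 : Int), p.1) else s)
    (0, -1)

/-- Invariant of A's loop: its max is the max of the degree table, and (for nonempty
input) its index is the last position achieving that max, i.e. length - 1 minus the
first position of the max in the reversed degree table. -/
theorem pvSt_spec (l : List (List Int)) :
    (pvSt l).1 = (pvDeg l).foldl max 0 ∧
    (l = [] → pvSt l = (0, -1)) ∧
    (l ≠ [] → ∃ j : Nat, PySem.List.index? (pvDeg l).reverse ((pvSt l).1) = some j ∧
      (pvSt l).2 = (l.length : Int) - 1 - (j : Int)) := by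
  induction l using List.reverseRecOn with
  | nil => simp [pvSt, pvDeg, PySem.List.enumerate]
  | append_singleton l r ih =>
    obtain ⟨ih1, ih2, ih3⟩ := ih
    have hstep : pvSt (l ++ [r]) =
        (if (pvSt l).1 ≤ (PySem.List.count r 1 : Int)
          then ((PySem.List.count r 1 : Int), (l.length : Int)) else pvSt l) := by
      simp [pvSt, PySem.List.enumerate_append, List.foldl_append, PySem.List.enumerate]
    have hdeg : pvDeg (l ++ [r]) = pvDeg l ++ [(PySem.List.count r 1 : Int)] := by
      simp [pvDeg]
    have hM : (pvDeg (l ++ [r])).foldl max 0 = max ((pvDeg l).foldl max 0) (PySem.List.count r 1 : Int) := by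
      rw [hdeg, List.foldl_append]; simp
    have hc : (0 : Int) ≤ (PySem.List.count r 1 : Int) := Int.natCast_nonneg _
    by_cases hle : (pvSt l).1 ≤ (PySem.List.count r 1 : Int)
    · rw [hstep, if_pos hle]
      refine ⟨?_, by simp, fun _ => ⟨0, ?_, by simp⟩⟩
      · rw [hM, ← ih1]; exact (max_eq_right hle).symm
      · rw [hdeg, List.reverse_append, List.reverse_singleton, List.singleton_append]
        exact PySem.List.index?_cons_self _ _
    · rw [hstep, if_neg hle]
      have hl : l ≠ [] := by
        rintro rfl
        exact hle (by simpa [pvSt, PySem.List.enumerate] using hc)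
      obtain ⟨j, hj, hj2⟩ := ih3 hl
      refine ⟨?_, by simp, fun _ => ⟨j + 1, ?_, ?_⟩⟩
      · rw [hM, ← ih1]; exact (max_eq_left (by omega)).symm
      · rw [hdeg]
        simp only [List.reverse_append, List.reverse_singleton, List.singleton_append]
        rw [PySem.List.index?_cons_of_ne _ (by omega : (PySem.List.count r 1 : Int) ≠ (pvSt l).1), hj]
        rfl
      · rw [hj2]; simp; omega

/-- A's port (range + indexing) is the fold of the same body over `enumerate`. -/
theorem portA_eq_pvSt (adj_mat : List (List Int)) :
    getMaxDegreeVertexIndex adj_mat = (if (pvSt adj_mat).1 = 0 then -1 else (pvSt adj_mat).2) := by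
  unfold getMaxDegreeVertexIndex pvSt
  rw [PySem.List.enumerate_eq_map_pyRange adj_mat ([] : List Int), List.foldl_map]
  rfl

/-- `max(degrees)` of a nonempty degree table is its running max from 0 (degrees are ≥ 0). -/
theorem pvMax_eq (l : List (List Int)) (h : l ≠ []) :
    PySem.List.max? (pvDeg l) (fun y => y) = some ((pvDeg l).foldl max 0) := by
  obtain ⟨r, t, rfl⟩ := List.exists_cons_of_ne_nil h
  show PySem.List.max? ((PySem.List.count r 1 : Int) :: pvDeg t) (fun y => y) = _
  rw [PySem.List.max?_id_cons]
  congr 1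

theorem pvFinal (adj_mat : List (List Int)) :
    getMaxDegreeVertexIndex adj_mat = getMaxDegreeVertexIndex_alt adj_mat := by
  rw [portA_eq_pvSt]
  obtain ⟨h1, h2, h3⟩ := pvSt_spec adj_mat
  rcases eq_or_ne adj_mat [] with rfl | hne
  · simp [getMaxDegreeVertexIndex_alt, h2 rfl]
  · obtain ⟨j, hj, hj2⟩ := h3 hne
    have hB : getMaxDegreeVertexIndex_alt adj_mat =
        match PySem.List.max? (pvDeg adj_mat) (fun y => y) with
        | none => -1
        | some m => if m = 0 then -1 else
            match PySem.List.index? (pvDeg adj_mat).reverse m with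
            | none => -1
            | some j => ((pvDeg adj_mat).length : Int) - 1 - (j : Int) := by
      unfold getMaxDegreeVertexIndex_alt
      rw [if_neg]
      · rfl
      · simp [List.isEmpty_iff, hne]
    rw [hB, pvMax_eq _ hne, ← h1]
    show _ = if (pvSt adj_mat).1 = 0 then -1 else
        (match PySem.List.index? (pvDeg adj_mat).reverse ((pvSt adj_mat).1) with
         | none => -1
         | some j => ((pvDeg adj_mat).length : Int) - 1 - (j : Int))
    rw [hj]
    split_ifs with h0
    · rfl
    · simp [pvDeg, hj2]

-- ===== VERDICT (by name: the statement is the Claim_ definition above) =====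
theorem getMaxDegreeVertexIndex_spec : Claim_equal_getMaxDegreeVertexIndex := by
  intro adj_mat _
  unfold Spec_getMaxDegreeVertexIndex
  exact pvFinal adj_mat
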